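-- pv_equiv track=rewrite | github.com/bncolorado/adsoScansionSystem | analysis/modules/AnalizadorSinalefas/PorReglas/sinalefaReglas.py | enmedioConjuncionAtonaDcha
-- ===== SOURCE A (Python) =====
-- def enmedioConjuncionAtonaDcha(verso, sinlalefPorResolver): #Une la conjunción con la palabra de la derecha
--         indice = int()
--         salida = ''
--         for item in verso:
--             if item == u' ':
--                 if verso[indice-1] in u'yaeouh' and (verso[indice-2] == ' ' or verso[indice-2] == '_') and verso[indice+1] in u'aeiouh':
--                     if sinlalefPorResolver > 0:
--                         salida += u'_'
--                         sinlalefPorResolver = sinlalefPorResolver-1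
--                     else:
--                         salida += item
--                 else:
--                     salida += item
--             else:
--                 salida += item
--             indice += 1
--         return salida, sinlalefPorResolver
-- ===== SOURCE B (Python) =====
-- def enmedioConjuncionAtonaDcha(verso, sinlalefPorResolver):
--     n = len(verso)
--     cands = [i for i in range(n)
--              if verso[i] == ' ' and verso[i - 1] in 'yaeouh'
--              and verso[i - 2] in ' _' and i + 1 < n and verso[i + 1] in 'aeiouh']
--     k = min(sinlalefPorResolver, len(cands)) if sinlalefPorResolver > 0 else 0
--     chars = list(verso)
--     for i in cands[:k]:
--         chars[i] = '_'
--     return ''.join(chars), sinlalefPorResolver - k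
-- ===== Notes on version B (the rewrite author's own statement) =====
-- stated objective: alternative
-- what changed: A fuses detection and output in one stateful loop; B first collects all candidate space indices in one pass, then computes how many replacements the counter allows and applies exactly those replacements to a character array; Pre_ excludes only the inputs (verse ending in a qualifying space) on which A raises IndexError.
import Mathlib
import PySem

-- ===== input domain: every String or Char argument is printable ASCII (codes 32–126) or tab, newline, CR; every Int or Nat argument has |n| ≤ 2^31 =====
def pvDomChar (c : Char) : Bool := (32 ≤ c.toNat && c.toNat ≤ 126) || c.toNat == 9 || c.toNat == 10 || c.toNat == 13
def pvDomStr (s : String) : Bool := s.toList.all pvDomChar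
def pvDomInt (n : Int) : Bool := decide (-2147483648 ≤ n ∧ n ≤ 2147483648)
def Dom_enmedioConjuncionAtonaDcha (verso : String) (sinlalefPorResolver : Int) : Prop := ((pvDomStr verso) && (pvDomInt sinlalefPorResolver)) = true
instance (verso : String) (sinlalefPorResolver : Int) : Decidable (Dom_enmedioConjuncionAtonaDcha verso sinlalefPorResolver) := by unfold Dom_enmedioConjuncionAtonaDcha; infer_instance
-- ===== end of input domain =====

-- B replaces A's fused stateful loop by a candidate-index pass plus a replacement pass (objective: alternative decomposition, same cost).

-- ===== PORT A =====
-- 'c in "yaeouh"' on an optional character (none = the index Python would raise on; under Pre_ the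
-- only none that can be reached is verso[indice+1] behind a false earlier conjunct, where Python
-- short-circuits, so 'false' is exact there).
def pvInChars (o : Option Char) (cs : List Char) : Bool :=
  match o with
  | some c => cs.contains c
  | none => false

-- one iteration of A's 'for item in verso' loop; p = (indice, item), st = (salida, sinlalefPorResolver)
def pvAstep (chars : List Char) (st : List Char × Int) (p : Int × Char) : List Char × Int :=
  if p.2 = ' ' then
    if pvInChars (PySem.List.pyGet? chars (p.1 - 1)) ['y','a','e','o','u','h']
        && (PySem.List.pyGet? chars (p.1 - 2) == some ' ' || PySem.List.pyGet? chars (p.1 - 2) == some '_')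
        && pvInChars (PySem.List.pyGet? chars (p.1 + 1)) ['a','e','i','o','u','h'] then
      if st.2 > 0 then (st.1 ++ ['_'], st.2 - 1) else (st.1 ++ [p.2], st.2)
    else (st.1 ++ [p.2], st.2)
  else (st.1 ++ [p.2], st.2)

def enmedioConjuncionAtonaDcha (verso : String) (sinlalefPorResolver : Int) : String × Int :=
  let chars := verso.toList
  let r := (PySem.List.enumerate chars 0).foldl (pvAstep chars) ([], sinlalefPorResolver)
  (String.ofList r.1, r.2)

-- ===== PORT B =====
-- B's candidate test for index i (the comprehension's conjuncts, in order)
def pvBcond (chars : List Char) (i : Int) : Bool :=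
  PySem.List.pyGet? chars i == some ' '
  && pvInChars (PySem.List.pyGet? chars (i - 1)) ['y','a','e','o','u','h']
  && pvInChars (PySem.List.pyGet? chars (i - 2)) [' ','_']
  && decide (i + 1 < (chars.length : Int))
  && pvInChars (PySem.List.pyGet? chars (i + 1)) ['a','e','i','o','u','h']

def enmedioConjuncionAtonaDcha_alt (verso : String) (sinlalefPorResolver : Int) : String × Int :=
  let chars := verso.toList
  let cands := (PySem.List.pyRange 0 (chars.length : Int) 1).filter (pvBcond chars)
  let k : Int := if sinlalefPorResolver > 0 then min sinlalefPorResolver (cands.length : Int) else 0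
  let chars2 := (PySem.List.slice cands none (some k)).foldl (fun l i => PySem.List.pySetD l i '_') chars
  (String.ofList chars2, sinlalefPorResolver - k)

-- ===== PRECONDITION & SPEC =====
-- Python A raises IndexError (verso[indice+1]) exactly when the last character is a qualifying space;
-- Pre_ excludes exactly those inputs (A returns normally everywhere else).
def pvRaiseCond (L : List Char) : Bool :=
  2 ≤ L.length
  && L.getD (L.length - 1) 'x' == ' '
  && ['y','a','e','o','u','h'].contains (L.getD (L.length - 2) 'x')
  && (L.length == 2 || [' ','_'].contains (L.getD (L.length - 3) 'x'))

def Pre_enmedioConjuncionAtonaDcha (verso : String) (sinlalefPorResolver : Int) : Prop :=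
  pvRaiseCond verso.toList = false
instance (verso : String) (sinlalefPorResolver : Int) : Decidable (Pre_enmedioConjuncionAtonaDcha verso sinlalefPorResolver) := by unfold Pre_enmedioConjuncionAtonaDcha; infer_instance

def pvWitness_enmedioConjuncionAtonaDcha : String × Int := ("y el alma", 2)

def Spec_enmedioConjuncionAtonaDcha (verso : String) (sinlalefPorResolver : Int) (out : String × Int) : Prop := out = enmedioConjuncionAtonaDcha_alt verso sinlalefPorResolver
instance (verso : String) (sinlalefPorResolver : Int) (out : String × Int) : Decidable (Spec_enmedioConjuncionAtonaDcha verso sinlalefPorResolver out) := by unfold Spec_enmedioConjuncionAtonaDcha; infer_instance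

-- ===== CLAIM (what is proved, stated in full; the proofs are below) =====
def Claim_equal_enmedioConjuncionAtonaDcha : Prop := ∀ (verso : String) (sinlalefPorResolver : Int), Dom_enmedioConjuncionAtonaDcha verso sinlalefPorResolver → Pre_enmedioConjuncionAtonaDcha verso sinlalefPorResolver → Spec_enmedioConjuncionAtonaDcha verso sinlalefPorResolver (enmedioConjuncionAtonaDcha verso sinlalefPorResolver)


-- ===== LEMMAS AND PROOFS =====

-- candidate indices of B from position j on
def pvCandsFrom (L : List Char) (j : Nat) : List Int :=
  (PySem.List.pyRange (j : Int) (L.length : Int) 1).filter (pvBcond L)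

-- number of replacements the counter c allows on candidate list S
def pvKOf (c : Int) (S : List Int) : Int :=
  if c > 0 then min c (S.length : Int) else 0

-- the characters of L from position j on, with positions in S replaced by '_'
def pvMarkFrom (L : List Char) (j : Nat) (S : List Int) : List Char :=
  (List.range (L.length - j)).map (fun p => if ((j + p : Nat) : Int) ∈ S then '_' else L.getD (j + p) ' ')

lemma pvIn_space_underscore (o : Option Char) :
    pvInChars o [' ', '_'] = (o == some ' ' || o == some '_') := by
  rcases o with _ | c
  · rfl
  · rw [Bool.eq_iff_iff]
    simp [pvInChars]

lemma pvMarkFrom_nil_idx (L : List Char) (j : Nat) (h : L.length ≤ j) (S : List Int) :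
    pvMarkFrom L j S = [] := by
  simp [pvMarkFrom, Nat.sub_eq_zero_of_le h]

lemma pvMarkFrom_cons (L : List Char) (j : Nat) (h : j < L.length) (S : List Int) :
    pvMarkFrom L j S
      = (if ((j : Nat) : Int) ∈ S then '_' else L[j]) :: pvMarkFrom L (j + 1) S := by
  unfold pvMarkFrom
  rw [show L.length - j = (L.length - (j + 1)) + 1 from by omega, List.range_succ_eq_map,
    List.map_cons, List.map_map]
  congr 1
  · simp [List.getD_eq_getElem?_getD, List.getElem?_eq_getElem h]
  · refine List.map_congr_left ?_
    intro p _
    have he : j + (p + 1) = j + 1 + p := by omega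
    simp [Function.comp, he]

lemma pvMarkFrom_of_lt (L : List Char) (j : Nat) (a : Int) (ha : a < (j : Int)) (S : List Int) :
    pvMarkFrom L j (a :: S) = pvMarkFrom L j S := by
  unfold pvMarkFrom
  refine List.map_congr_left ?_
  intro p _
  have hne : ¬((j : Int) + (p : Int) = a) := by omega
  simp [List.mem_cons, hne]

lemma pvCandsFrom_mem_ge (L : List Char) (j : Nat) (x : Int) (hx : x ∈ pvCandsFrom L j) :
    (j : Int) ≤ x := by
  unfold pvCandsFrom at hx
  rw [List.mem_filter] at hx
  exact (PySem.List.mem_pyRange_one.mp hx.1).1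

lemma pvCandsFrom_mem_lt (L : List Char) (j : Nat) (x : Int) (hx : x ∈ pvCandsFrom L j) :
    x < (L.length : Int) := by
  unfold pvCandsFrom at hx
  rw [List.mem_filter] at hx
  exact (PySem.List.mem_pyRange_one.mp hx.1).2

lemma pvCandsFrom_nil (L : List Char) (j : Nat) (h : L.length ≤ j) : pvCandsFrom L j = [] := by
  unfold pvCandsFrom
  rw [PySem.List.pyRange_one_eq_nil (by exact_mod_cast h)]
  simp

lemma pvCandsFrom_cons (L : List Char) (j : Nat) (h : j < L.length) :
    pvCandsFrom L j
      = if pvBcond L (j : Int) then (j : Int) :: pvCandsFrom L (j + 1) else pvCandsFrom L (j + 1) := by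
  unfold pvCandsFrom
  rw [PySem.List.pyRange_one_cons (by exact_mod_cast h),
    show (j : Int) + 1 = ((j + 1 : Nat) : Int) from by push_cast; ring, List.filter_cons]

-- A's inner condition at a real index j equals B's candidate test (given the enumerated item L[j])
lemma pvCond_eq (L : List Char) (j : Nat) (h : j < L.length) :
    pvBcond L (j : Int)
      = ((L[j] == ' ')
          && (pvInChars (PySem.List.pyGet? L ((j : Int) - 1)) ['y','a','e','o','u','h']
              && (PySem.List.pyGet? L ((j : Int) - 2) == some ' ' || PySem.List.pyGet? L ((j : Int) - 2) == some '_')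
              && pvInChars (PySem.List.pyGet? L ((j : Int) + 1)) ['a','e','i','o','u','h'])) := by
  unfold pvBcond
  have h0 : PySem.List.pyGet? L ((j : Nat) : Int) = some L[j] := by
    rw [PySem.List.pyGet?_natCast]
    exact List.getElem?_eq_getElem h
  rw [h0, pvIn_space_underscore]
  by_cases hb : (j : Int) + 1 < (L.length : Int)
  · simp [hb, Bool.and_assoc]
  · have hnone : PySem.List.pyGet? L ((j : Int) + 1) = none := by
      rw [show (j : Int) + 1 = ((j + 1 : Nat) : Int) from by push_cast; ring,
        PySem.List.pyGet?_natCast]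
      refine List.getElem?_eq_none ?_
      push_cast at hb
      omega
    simp [hb, hnone, pvInChars]

lemma pvKOf_nil (c : Int) : pvKOf c [] = 0 := by
  unfold pvKOf
  split_ifs with h
  · simp only [List.length_nil, Nat.cast_zero]
    omega
  · rfl

lemma pvKOf_nonneg (c : Int) (S : List Int) : 0 ≤ pvKOf c S := by
  unfold pvKOf
  split_ifs with h <;> omega

lemma pvKOf_nonpos (c : Int) (S : List Int) (hc : ¬ c > 0) : pvKOf c S = 0 := by
  unfold pvKOf
  rw [if_neg hc]

lemma pvKOf_cons_pos (c : Int) (x : Int) (T : List Int) (hc : c > 0) :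
    pvKOf c (x :: T) = 1 + pvKOf (c - 1) T := by
  unfold pvKOf
  rw [if_pos hc]
  split_ifs with h2 <;> simp only [List.length_cons] <;> push_cast <;> omega

-- master invariant: A's loop from position j with counter c computes B's two-pass result on the suffix
lemma pvMaster (L : List Char) (fuel : Nat) : ∀ (j : Nat) (c : Int) (acc : List Char),
    L.length - j = fuel →
    (PySem.List.enumerate (L.drop j) (j : Int)).foldl (pvAstep L) (acc, c)
      = (acc ++ pvMarkFrom L j ((pvCandsFrom L j).take (pvKOf c (pvCandsFrom L j)).toNat),
         c - pvKOf c (pvCandsFrom L j)) := by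
  induction fuel with
  | zero =>
    intro j c acc hf
    have hj : L.length ≤ j := by omega
    rw [List.drop_eq_nil_of_le hj, PySem.List.enumerate_nil, List.foldl_nil,
      pvCandsFrom_nil L j hj, pvKOf_nil]
    simp [pvMarkFrom_nil_idx L j hj]
  | succ m ih =>
    intro j c acc hf
    have hj : j < L.length := by omega
    have hdrop : L.drop j = L[j] :: L.drop (j + 1) := List.drop_eq_getElem_cons hj
    rw [hdrop, PySem.List.enumerate_cons, List.foldl_cons,
      show (j : Int) + 1 = ((j + 1 : Nat) : Int) from by push_cast; ring]
    have hcond := pvCond_eq L j hj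
    by_cases hb : pvBcond L (j : Int) = true
    · have hb' := hb
      rw [hcond] at hb'
      rw [Bool.and_eq_true] at hb'
      obtain ⟨h1, h2⟩ := hb'
      have hsp : L[j] = ' ' := eq_of_beq h1
      have hstep : pvAstep L (acc, c) ((j : Int), L[j])
          = if c > 0 then (acc ++ ['_'], c - 1) else (acc ++ [L[j]], c) := by
        unfold pvAstep
        simp only [hsp, h2, if_pos]
      rw [hstep, pvCandsFrom_cons L j hj, if_pos hb]
      by_cases hc : c > 0
      · rw [if_pos hc, ih (j + 1) (c - 1) (acc ++ ['_']) (by omega)]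
        have hknn : 0 ≤ pvKOf (c - 1) (pvCandsFrom L (j + 1)) := pvKOf_nonneg _ _
        have htake : ((j : Int) :: pvCandsFrom L (j + 1)).take (pvKOf c ((j : Int) :: pvCandsFrom L (j + 1))).toNat
            = (j : Int) :: (pvCandsFrom L (j + 1)).take (pvKOf (c - 1) (pvCandsFrom L (j + 1))).toNat := by
          rw [pvKOf_cons_pos c _ _ hc,
            show (1 + pvKOf (c - 1) (pvCandsFrom L (j + 1))).toNat
              = (pvKOf (c - 1) (pvCandsFrom L (j + 1))).toNat + 1 from by omega,
            List.take_succ_cons]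
        rw [htake, pvMarkFrom_cons L j hj, if_pos (by simp),
          pvMarkFrom_of_lt L (j + 1) (j : Int) (by push_cast; omega) _,
          pvKOf_cons_pos c _ _ hc]
        simp only [Prod.mk.injEq]
        refine ⟨?_, by omega⟩
        simp [List.append_assoc]
      · rw [if_neg hc, ih (j + 1) c (acc ++ [L[j]]) (by omega),
          pvKOf_nonpos c _ hc, pvKOf_nonpos c _ hc]
        simp only [Int.toNat_zero, List.take_zero]
        rw [pvMarkFrom_cons L j hj, if_neg (by simp)]
        simp [List.append_assoc]
    · have hb' : pvBcond L (j : Int) = false := by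
        cases hval : pvBcond L (j : Int)
        · rfl
        · exact absurd hval hb
      have hstep : pvAstep L (acc, c) ((j : Int), L[j]) = (acc ++ [L[j]], c) := by
        unfold pvAstep
        by_cases hs : L[j] = ' '
        · have htrue : (L[j] == ' ') = true := by rw [hs]; decide
          rw [hcond, htrue, Bool.true_and] at hb'
          simp only [hs, hb']
          simp
        · simp [hs]
      rw [hstep, ih (j + 1) c (acc ++ [L[j]]) (by omega),
        pvCandsFrom_cons L j hj, if_neg (by simp [hb'])]
      have hnot : ((j : Nat) : Int) ∉
          (pvCandsFrom L (j + 1)).take (pvKOf c (pvCandsFrom L (j + 1))).toNat := by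
        intro hmem
        have := pvCandsFrom_mem_ge L (j + 1) _ (List.mem_of_mem_take hmem)
        push_cast at this
        omega
      rw [pvMarkFrom_cons L j hj, if_neg hnot]
      simp [List.append_assoc]

-- the replacement pass, pointwise
lemma pvSetFold_getElem? (S : List Int) : ∀ (L : List Char) (p : Nat),
    (∀ x ∈ S, 0 ≤ x ∧ x < (L.length : Int)) →
    (S.foldl (fun l i => PySem.List.pySetD l i '_') L)[p]?
      = if ((p : Nat) : Int) ∈ S then (if p < L.length then some '_' else none) else L[p]? := by
  induction S with
  | nil => intro L p _; simp
  | cons i S ih =>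
    intro L p hb
    rw [List.foldl_cons]
    have hi := hb i (List.mem_cons_self ..)
    have hset : PySem.List.pySetD L i '_' = L.set i.toNat '_' := by exact PySem.List.pySetD_of_nonneg _ _ hi.1
    have hb' : ∀ x ∈ S, 0 ≤ x ∧ x < ((L.set i.toNat '_').length : Int) := by
      intro x hx
      have := hb x (List.mem_cons_of_mem _ hx)
      simpa using this
    rw [hset, ih (L.set i.toNat '_') p hb']
    by_cases hpS : ((p : Nat) : Int) ∈ S
    · simp [hpS, List.mem_cons]
    · by_cases hpi : ((p : Nat) : Int) = i
      · have hpi' : p = i.toNat := by omega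
        have hilen : i.toNat < L.length := by omega
        simp only [List.length_set, List.mem_cons, hpi, true_or, if_true]
        rw [hpi']
        simp [hilen]
      · have hne : i.toNat ≠ p := by omega
        simp only [hpS, if_false, List.mem_cons, hpi, false_or]
        rw [List.getElem?_set]
        simp [hne]
lemma pvSetFold_eq_mark (L : List Char) (S : List Int)
    (hb : ∀ x ∈ S, 0 ≤ x ∧ x < (L.length : Int)) :
    S.foldl (fun l i => PySem.List.pySetD l i '_') L = pvMarkFrom L 0 S := by
  refine List.ext_getElem? ?_
  intro p
  rw [pvSetFold_getElem? S L p hb]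
  unfold pvMarkFrom
  rw [Nat.sub_zero]
  by_cases hp : p < L.length
  · rw [List.getElem?_map, List.getElem?_range hp]
    by_cases hmem : ((p : Nat) : Int) ∈ S
    · simp [hp, hmem]
    · simp [hp, hmem, List.getD_eq_getElem?_getD]
  · have hmem : ((p : Nat) : Int) ∉ S := by
      intro hm
      have := hb _ hm
      omega
    have h1 : L[p]? = none := List.getElem?_eq_none (by omega)
    have h2 : (List.range L.length)[p]? = none := List.getElem?_eq_none (by simpa using hp)
    rw [List.getElem?_map]
    simp [hmem, h1, h2]

-- ===== VERDICT (by name: the statement is the Claim_ definition above) =====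
theorem enmedioConjuncionAtonaDcha_spec : Claim_equal_enmedioConjuncionAtonaDcha := by
  intro verso s _ _
  unfold Spec_enmedioConjuncionAtonaDcha enmedioConjuncionAtonaDcha enmedioConjuncionAtonaDcha_alt
  dsimp only
  have h0 := pvMaster verso.toList verso.toList.length 0 s [] (by omega)
  simp only [Nat.cast_zero, List.drop_zero, List.nil_append] at h0
  rw [h0]
  have hC : (PySem.List.pyRange 0 ((verso.toList.length : Nat) : Int) 1).filter (pvBcond verso.toList)
      = pvCandsFrom verso.toList 0 := by
    unfold pvCandsFrom
    norm_num
  rw [hC,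
    show (if s > 0 then min s ((pvCandsFrom verso.toList 0).length : Int) else 0)
      = pvKOf s (pvCandsFrom verso.toList 0) from rfl,
    show PySem.List.slice (pvCandsFrom verso.toList 0) none (some (pvKOf s (pvCandsFrom verso.toList 0)))
        = (pvCandsFrom verso.toList 0).take (pvKOf s (pvCandsFrom verso.toList 0)).toNat
      from PySem.List.slice_to _ (pvKOf_nonneg s _),
    pvSetFold_eq_mark verso.toList _ (by
      intro x hx
      have hx' := List.mem_of_mem_take hx
      exact ⟨le_trans (by norm_num) (pvCandsFrom_mem_ge _ _ _ hx'), pvCandsFrom_mem_lt _ _ _ hx'⟩)]
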